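-- pv_equiv track=rewrite | github.com/OpabekDastan/PP2_dastan | lab3/functions1/task08.py | spy
-- ===== SOURCE A (Python) =====
-- def spy(x):
--     zero_cnt=0
--     sevens=False
--     for i in x:
--         if(i==0 and zero_cnt==0):
--             zero_cnt+=1
--         elif(i==0 and zero_cnt==1):
--             zero_cnt+=1
--         elif(i==7 and zero_cnt==2):
--             sevens=True
--             break
--     return sevens
-- ===== SOURCE B (Python) =====
-- def spy(x):
--     if x.count(0) < 2:
--         return False
--     tail = x[x.index(0) + 1:]        # after the first 0
--     rest = tail[tail.index(0) + 1:]  # after the second 0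
--     return 7 in rest
-- ===== Notes on version B (the rewrite author's own statement) =====
-- stated objective: idiomatic
-- what changed: Replaced A's one-pass counter/flag state machine with a loop-free composition of list primitives: count(0) to decide feasibility, two index/slice steps to cut off everything up to the second 0, and a membership test for 7.
import Mathlib
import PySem

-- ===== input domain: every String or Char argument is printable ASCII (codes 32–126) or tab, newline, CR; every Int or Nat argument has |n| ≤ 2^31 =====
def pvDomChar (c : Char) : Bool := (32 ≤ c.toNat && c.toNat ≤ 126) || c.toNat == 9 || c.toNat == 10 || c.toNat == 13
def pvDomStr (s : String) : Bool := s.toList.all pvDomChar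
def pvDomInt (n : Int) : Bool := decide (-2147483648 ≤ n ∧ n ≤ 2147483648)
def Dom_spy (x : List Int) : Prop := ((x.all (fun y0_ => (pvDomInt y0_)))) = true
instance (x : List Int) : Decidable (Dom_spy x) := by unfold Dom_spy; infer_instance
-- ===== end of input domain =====

-- B replaces A's one-pass counter/flag state machine by a loop-free composition of
-- list primitives (count, index, slice, membership); objective: idiomatic, same O(n).

-- ===== PORT A =====
-- A's loop with state zero_cnt and early break, transcribed as structural recursion.
def spyGo : List Int → Int → Bool
  | [], _ => false
  | i :: rest, c =>
      if i = 0 ∧ c = 0 then spyGo rest (c + 1)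
      else if i = 0 ∧ c = 1 then spyGo rest (c + 1)
      else if i = 7 ∧ c = 2 then true
      else spyGo rest c

def spy (x : List Int) : Bool := spyGo x 0

-- ===== PORT B =====
-- x.count(0) < 2 → False; otherwise cut after the first 0, then after the second 0,
-- and test 7 ∈ rest.  (The 'none' branches of index? are unreachable: count ≥ 2
-- guarantees a 0 is present; they only make the match total.)
def spy_alt (x : List Int) : Bool :=
  if PySem.List.count x 0 < 2 then false
  else
    match PySem.List.index? x 0 with
    | none => false
    | some i =>
      -- tail = x[x.index(0)+1:], rest = tail[tail.index(0)+1:], inlined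
      match PySem.List.index? (PySem.List.slice x (some ((i : Int) + 1)) none) 0 with
      | none => false
      | some j =>
        decide (7 ∈ PySem.List.slice (PySem.List.slice x (some ((i : Int) + 1)) none)
                      (some ((j : Int) + 1)) none)

-- ===== PRECONDITION & SPEC =====
def Spec_spy (x : List Int) (out : Bool) : Prop := out = spy_alt x
instance (x : List Int) (out : Bool) : Decidable (Spec_spy x out) := by unfold Spec_spy; infer_instance

-- ===== CLAIM =====
def Claim_equal_spy : Prop := ∀ (x : List Int), Dom_spy x → Spec_spy x (spy x)

-- ===== LEMMAS AND PROOFS =====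

-- A with zero_cnt = 2 just scans for a 7.
theorem spyGo_two (l : List Int) : spyGo l 2 = decide (7 ∈ l) := by
  induction l with
  | nil => rfl
  | cons i rest ih =>
      simp only [spyGo]
      by_cases h0 : i = 0
      · simp [h0, ih]
      · by_cases h7 : i = 7 <;> simp [h0, h7, ih, eq_comm]

-- A with zero_cnt = 1 skips to the first 0, then scans for a 7.
theorem spyGo_one (l : List Int) :
    spyGo l 1 = (match PySem.List.index? l 0 with
                 | none => false
                 | some j => decide (7 ∈ l.drop (j + 1))) := by
  induction l with
  | nil => rfl
  | cons i rest ih =>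
      simp only [spyGo]
      by_cases h0 : i = 0
      · subst h0
        rw [PySem.List.index?_cons_self]
        simp [spyGo_two]
      · rw [PySem.List.index?_cons_of_ne rest h0]
        have h7 : ¬ (i = 7 ∧ (1:Int) = 2) := by rintro ⟨_, h⟩; omega
        simp only [h0, false_and, if_false, h7]
        rw [ih]
        cases PySem.List.index? rest 0 <;> simp

-- A with zero_cnt = 0 skips to the first 0, then runs with zero_cnt = 1.
theorem spyGo_zero (l : List Int) :
    spyGo l 0 = (match PySem.List.index? l 0 with
                 | none => false
                 | some i => spyGo (l.drop (i + 1)) 1) := by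
  induction l with
  | nil => rfl
  | cons i rest ih =>
      simp only [spyGo]
      by_cases h0 : i = 0
      · subst h0
        rw [PySem.List.index?_cons_self]
        simp
      · rw [PySem.List.index?_cons_of_ne rest h0]
        have h7 : ¬ (i = 7 ∧ (0:Int) = 2) := by rintro ⟨_, h⟩; omega
        simp only [h0, false_and, if_false, h7]
        rw [ih]
        cases PySem.List.index? rest 0 <;> simp

-- ===== VERDICT =====
theorem spy_spec : Claim_equal_spy := by
  intro x _
  unfold Spec_spy spy spy_alt
  rw [spyGo_zero]
  cases hidx : PySem.List.index? x 0 with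
  | none => simp
  | some i =>
      obtain ⟨pre, suf, hx, hlen, hnm⟩ := (PySem.List.index?_eq_some_iff _ _ _).mp hidx
      have htail : PySem.List.slice x (some ((i : Int) + 1)) none = x.drop (i + 1) := by
        have : ((i : Int) + 1) = ((i + 1 : Nat) : Int) := by push_cast; ring
        rw [this, PySem.List.slice_from_natCast]
      have hdrop : x.drop (i + 1) = suf := by
        subst hx hlen
        simp
      have hcount : PySem.List.count x 0 = 1 + PySem.List.count suf 0 := by
        subst hx hlen
        simp [PySem.List.count_eq, List.count_eq_zero_of_not_mem hnm]
        omega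
      simp only [htail, hdrop]
      cases hidx2 : PySem.List.index? suf 0 with
      | none =>
          rw [spyGo_one, hidx2]
          simp
      | some j =>
          have h0 : (0:Int) ∈ suf :=
            (PySem.List.index?_isSome_iff suf (0:Int)).mp (by rw [hidx2]; rfl)
          have hc : 1 ≤ PySem.List.count suf 0 := by
            simpa [PySem.List.count_eq] using List.one_le_count_iff.mpr h0
          rw [spyGo_one, hidx2]
          have hrest : PySem.List.slice suf (some ((j : Int) + 1)) none = suf.drop (j + 1) := by
            have : ((j : Int) + 1) = ((j + 1 : Nat) : Int) := by push_cast; ring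
            rw [this, PySem.List.slice_from_natCast]
          have hgt : 1 < List.count 0 x := by
            simp only [PySem.List.count_eq] at hcount hc
            omega
          simp [hrest, hgt]
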